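-- pv_equiv track=rewrite | github.com/minjeongnew/algorithm-study | programmers/level3/최고의_집합.py | solution
-- ===== SOURCE A (Python) =====
-- def solution(n, s):
--     # 원소 간 차이가 적을 수록 원소의 곱이 최대가 댐
--     if n > s:
--         return [-1]
--     d = s // n
--     mod = s % n
--     answer = [d] * n
--     idx = -1 # 리스트의 끝의 원소에서부터 1 증가
--     while mod:
--         answer[idx] += 1
--         idx -= 1
--         mod -= 1
--     return answer
-- ===== SOURCE B (Python) =====
-- def solution(n, s):
--     if n > s:
--         return [-1]
--     # greedy: each element takes the floor of the remaining sum over the remaining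
--     # slot count; this yields the max-product multiset in nondecreasing order.
--     answer = []
--     remaining = s
--     k = n
--     while k > 0:
--         q = remaining // k
--         answer.append(q)
--         remaining -= q
--         k -= 1
--     return answer
-- ===== Notes on version B (the rewrite author's own statement) =====
-- stated objective: alternative
-- what changed: Replaces A's fill-with-s//n-then-increment-from-the-end scheme by a single greedy pass that gives each element the floor of the remaining sum over the remaining slot count; no prebuilt list, no remainder counter, no negative-index mutation.
import Mathlib
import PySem

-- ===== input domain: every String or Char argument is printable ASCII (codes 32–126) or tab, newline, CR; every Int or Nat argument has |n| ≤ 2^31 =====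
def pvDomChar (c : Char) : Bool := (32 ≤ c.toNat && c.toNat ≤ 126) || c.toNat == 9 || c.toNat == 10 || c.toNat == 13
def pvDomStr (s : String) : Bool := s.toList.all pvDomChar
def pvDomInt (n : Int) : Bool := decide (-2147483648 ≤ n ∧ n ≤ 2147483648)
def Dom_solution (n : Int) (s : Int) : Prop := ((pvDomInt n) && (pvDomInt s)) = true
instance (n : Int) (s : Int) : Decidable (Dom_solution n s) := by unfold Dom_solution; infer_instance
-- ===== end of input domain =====

-- B replaces A's fill-then-increment loop by a recursive greedy that gives each element
-- the floor of the remaining sum over the remaining slots (objective: alternative).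

-- ===== PORT A =====
-- while mod: answer[idx] += 1; idx -= 1; mod -= 1
-- Fuel = mod.toNat: exact because inside Pre_ the loop variable mod is ≥ 0 at entry and
-- decreases by 1 each iteration; pyGetD/pySetD are exact since idx stays in range inside Pre_.
def solutionLoopA (answer : List Int) (idx : Int) : Nat → List Int
  | 0 => answer
  | m + 1 =>
      solutionLoopA (PySem.List.pySetD answer idx (PySem.List.pyGetD answer idx 0 + 1)) (idx - 1) m

def solution (n : Int) (s : Int) : List Int :=
  if n > s then [-1]
  else
    let d := PySem.Int.floordiv s n
    let mod := PySem.Int.mod s n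
    let answer := List.replicate n.toNat d   -- [d] * n (empty for n ≤ 0, as in Python)
    solutionLoopA answer (-1) mod.toNat

-- ===== PORT B =====
-- while k > 0: q = remaining // k ; answer.append(q) ; remaining -= q ; k -= 1
def solutionLoopB (k : Int) (t : Int) (acc : List Int) : List Int :=
  if h : k ≤ 0 then acc
  else solutionLoopB (k - 1) (t - PySem.Int.floordiv t k) (acc ++ [PySem.Int.floordiv t k])
termination_by k.toNat
decreasing_by omega

def solution_alt (n : Int) (s : Int) : List Int :=
  if n > s then [-1] else solutionLoopB n s []

-- ===== PRECONDITION & SPEC =====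
-- Pre_ excludes exactly the inputs where A raises: n = 0 with s ≥ 0 (ZeroDivisionError),
-- and n < 0 with n ≤ s and s % n ≠ 0 (IndexError on the empty answer list).
def Pre_solution (n : Int) (s : Int) : Prop :=
  0 < n ∨ n > s ∨ (n < 0 ∧ PySem.Int.mod s n = 0)
instance (n : Int) (s : Int) : Decidable (Pre_solution n s) := by unfold Pre_solution; infer_instance
def pvWitness_solution : Int × Int := (3, 11)
def Spec_solution (n : Int) (s : Int) (out : List Int) : Prop := out = solution_alt n s
instance (n : Int) (s : Int) (out : List Int) : Decidable (Spec_solution n s out) := by unfold Spec_solution; infer_instance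

-- ===== CLAIM (what is proved, stated in full; the proofs are below) =====
def Claim_equal_solution : Prop := ∀ (n : Int) (s : Int), Dom_solution n s → Pre_solution n s → Spec_solution n s (solution n s)

-- ===== LEMMAS AND PROOFS =====

-- Proof-side recursive view of B's while-loop (the loop minus its accumulator).
def buildB (k : Int) (t : Int) : List Int :=
  if h : k ≤ 0 then []
  else
    PySem.Int.floordiv t k :: buildB (k - 1) (t - PySem.Int.floordiv t k)
termination_by k.toNat
decreasing_by omega

lemma loopB_eq_build : ∀ (fuel : Nat) (k t : Int) (acc : List Int), k.toNat = fuel →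
    solutionLoopB k t acc = acc ++ buildB k t := by
  intro fuel
  induction fuel with
  | zero =>
      intro k t acc hf
      rw [solutionLoopB, dif_pos (by omega), buildB, dif_pos (by omega), List.append_nil]
  | succ f ih =>
      intro k t acc hf
      by_cases hk : k ≤ 0
      · rw [solutionLoopB, dif_pos hk, buildB, dif_pos hk, List.append_nil]
      · rw [solutionLoopB, dif_neg hk, buildB, dif_neg hk,
            ih (k - 1) _ _ (by omega), List.append_assoc]
        rfl

-- ----- A side: the loop moves one element per step from the d-block to the (d+1)-block -----

lemma set_replicate_last (d : Int) (a : Nat) (ha : 1 ≤ a) :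
    (List.replicate a d).set (a - 1) (d + 1) = List.replicate (a - 1) d ++ [d + 1] := by
  rw [List.set_eq_take_append_cons_drop]
  simp only [List.take_replicate, List.drop_replicate, List.length_replicate]
  have h1 : min (a - 1) a = a - 1 := by omega
  have h2 : a - (a - 1 + 1) = 0 := by omega
  rw [if_pos (by omega), h1, h2]
  simp

lemma step_lemma (d : Int) (a b : Nat) (ha : 1 ≤ a) :
    PySem.List.pySetD (List.replicate a d ++ List.replicate b (d + 1)) (-(b + 1 : Int))
        (PySem.List.pyGetD (List.replicate a d ++ List.replicate b (d + 1)) (-(b + 1 : Int)) 0 + 1)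
      = List.replicate (a - 1) d ++ List.replicate (b + 1) (d + 1) := by
  have hc : (-(b + 1 : Int)) = -((b + 1 : Nat) : Int) := by push_cast; ring
  have hlen : (List.replicate a d ++ List.replicate b (d + 1)).length = a + b := by simp
  have hget : PySem.List.pyGetD (List.replicate a d ++ List.replicate b (d + 1)) (-(b + 1 : Int)) 0 = d := by
    rw [hc, PySem.List.pyGetD_neg_natCast _ (b + 1) 0 (by omega) (by omega)]
    rw [List.getElem_append_left (by simpa using (by omega : a + b - (b + 1) < a))]
    simp
  rw [hget]
  have hset : PySem.List.pySetD (List.replicate a d ++ List.replicate b (d + 1)) (-(b + 1 : Int)) (d + 1)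
      = (List.replicate a d ++ List.replicate b (d + 1)).set (a - 1) (d + 1) := by
    simp only [PySem.List.pySetD, PySem.List.pySet?, PySem.List.pyIdx?, hlen]
    rw [if_neg (by omega), if_pos (by push_cast; omega)]
    have h3 : a + b - (b + 1) = a - 1 := by omega
    simp [h3]
  rw [hset, List.set_append, if_pos (by simp; omega)]
  rw [set_replicate_last d a ha, List.append_assoc]
  congr 1

-- Running the loop m times (m ≤ a) moves m elements from the d-block to the (d+1)-block.
lemma loop_lemma (d : Int) : ∀ (m a b : Nat), m ≤ a →
    solutionLoopA (List.replicate a d ++ List.replicate b (d + 1)) (-(b + 1 : Int)) m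
      = List.replicate (a - m) d ++ List.replicate (b + m) (d + 1) := by
  intro m
  induction m with
  | zero => intro a b _; simp [solutionLoopA]
  | succ k ih =>
      intro a b hm
      have ha : 1 ≤ a := by omega
      show solutionLoopA _ _ (k + 1) = _
      rw [solutionLoopA, step_lemma d a b ha]
      have : (-(b + 1 : Int) - 1) = -((b + 1 : Nat) + 1 : Int) := by push_cast; ring
      rw [this, ih (a - 1) (b + 1) (by omega)]
      congr 1 <;> congr 1 <;> omega

-- ----- B side: the greedy recursion produces the same two-block closed form -----

lemma buildB_eq : ∀ (fuel : Nat) (k t : Int), k.toNat = fuel → 0 < k → 0 ≤ t →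
    buildB k t
      = List.replicate (k.toNat - (t % k).toNat) (t / k)
          ++ List.replicate ((t % k).toNat) (t / k + 1) := by
  intro fuel
  induction fuel with
  | zero => intro k t hf hk _; omega
  | succ f ih =>
      intro k t hf hk ht
      rw [buildB, dif_neg (by omega)]
      have hq : PySem.Int.floordiv t k = t / k := PySem.Int.floordiv_eq_ediv_of_pos hk
      set q := t / k with hqdef
      set r := t % k with hrdef
      have hdm : q * k + r = t := by rw [hqdef, hrdef]; rw [mul_comm]; exact Int.ediv_add_emod t k
      have hr0 : 0 ≤ r := Int.emod_nonneg t (by omega)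
      have hrk : r < k := Int.emod_lt_of_pos t hk
      by_cases hk1 : k = 1
      · -- last element takes the full remainder
        subst hk1
        rw [buildB, dif_pos (by omega)]
        have : r = 0 := by omega
        simp [this, ← hrdef]
        rw [hqdef, Int.ediv_one]
      · -- k ≥ 2 : recurse on k-1 slots and remaining sum t - q
        have hk2 : 2 ≤ k := by omega
        have htq : t - PySem.Int.floordiv t k = q * (k - 1) + r := by rw [hq]; ring_nf; omega
        rw [htq, ih (k - 1) (q * (k - 1) + r) (by omega) (by omega) (by nlinarith)]
        by_cases hcase : r < k - 1
        · have hmod : (q * (k - 1) + r) % (k - 1) = r := by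
            rw [add_comm, mul_comm, Int.add_mul_emod_self_left]
            exact Int.emod_eq_of_lt hr0 hcase
          have hdiv : (q * (k - 1) + r) / (k - 1) = q := by
            rw [add_comm, Int.add_mul_ediv_right _ _ (by omega : k - 1 ≠ 0)]
            rw [Int.ediv_eq_zero_of_lt hr0 hcase]; ring
          rw [hmod, hdiv, hq]
          have : k.toNat - r.toNat = ((k - 1).toNat - r.toNat) + 1 := by omega
          rw [this, List.replicate_succ]
          simp
        · -- r = k - 1 : all remaining slots get q + 1
          have hre : r = k - 1 := by omega
          have heq : q * (k - 1) + r = (q + 1) * (k - 1) := by rw [hre]; ring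
          have hmod : (q * (k - 1) + r) % (k - 1) = 0 := by
            rw [heq]; exact Int.mul_emod_left _ _
          have hdiv : (q * (k - 1) + r) / (k - 1) = q + 1 := by
            rw [heq]; exact Int.mul_ediv_cancel _ (by omega)
          rw [hmod, hdiv, hq]
          have h1 : k.toNat - r.toNat = 1 := by omega
          have h2 : r.toNat = (k - 1).toNat := by omega
          have h3 : k.toNat - (k.toNat - 1) = 1 := by omega
          simp [h2, h3]

-- ===== VERDICT (by name: the statements are the Claim_ definitions above) =====
theorem solution_spec : Claim_equal_solution := by
  intro n s _ hpre
  unfold Spec_solution solution solution_alt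
  by_cases hns : n > s
  · simp [hns]
  · simp only [hns, if_false]
    rcases hpre with hn | hns' | ⟨hn, hm⟩
    · -- 0 < n : the real case
      have hmod : PySem.Int.mod s n = s % n := PySem.Int.mod_eq_emod_of_pos hn
      have hdiv : PySem.Int.floordiv s n = s / n := PySem.Int.floordiv_eq_ediv_of_pos hn
      have h0 : 0 ≤ s % n := Int.emod_nonneg s (by omega)
      have h1 : s % n < n := Int.emod_lt_of_pos s hn
      have hs0 : 0 ≤ s := by omega
      have hinit : List.replicate n.toNat (PySem.Int.floordiv s n)
          = List.replicate n.toNat (PySem.Int.floordiv s n) ++ List.replicate 0 (PySem.Int.floordiv s n + 1) := by simp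
      rw [hmod, hinit]
      have hneg : (-1 : Int) = -((0 : Nat) + 1 : Int) := by norm_num
      rw [hneg, loop_lemma (PySem.Int.floordiv s n) (s % n).toNat n.toNat 0 (by omega)]
      rw [loopB_eq_build n.toNat n s [] rfl, List.nil_append,
         buildB_eq n.toNat n s rfl hn hs0, hdiv]
      congr 1 <;> congr 1 <;> omega
    · omega
    · -- n < 0 and s % n = 0 : both sides are []
      rw [hm]
      rw [loopB_eq_build n.toNat n s [] rfl, List.nil_append, buildB, dif_pos (by omega)]
      simp [solutionLoopA, Int.toNat_of_nonpos (by omega : n ≤ 0)]
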